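-- pv_equiv track=rewrite | github.com/aakib97/Python_Learning | Code for thought 17/bs.py | rotatecount
-- ===== SOURCE A (Python) =====
-- def bs(L, item, left=0, right=None):
--     if right is None: right = len(L)
--     if right - left == 0: return False
--     if right - left == 1: return L[left] == item
--     median = (right + left) // 2
--     if L[median] == item: return True
--     if item < L[median]:
--         return bs(L, item, left, median)
--     else:
--         return bs(L, item, median, right)
--
-- def rotatecount(L):
--     count = 0
--     for i in L:
--         if not bs(L, i):
--             if L.index(i) == 0:
--                 count = L.index(i) + 1
--             else:
--                 count = L.index(i)
--     return count
-- ===== SOURCE B (Python) =====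
-- def bs(L, item, left=0, right=None):
--     if right is None:
--         right = len(L)
--     while True:
--         width = right - left
--         if width == 0:
--             return False
--         if width == 1:
--             return L[left] == item
--         median = (right + left) // 2
--         if L[median] == item:
--             return True
--         if item < L[median]:
--             right = median
--         else:
--             left = median
--
-- def rotatecount(L):
--     first = {}
--     for j, v in enumerate(L):
--         if v not in first:
--             first[v] = j
--     count = 0
--     for v in L:
--         if not bs(L, v):
--             fj = first[v]
--             count = 1 if fj == 0 else fj
--     return count
-- ===== Notes on version B (the rewrite author's own statement) =====
-- stated objective: faster
-- what changed: B precomputes a first-occurrence-index dict in one pass and reads it instead of calling L.index twice per element, and replaces the recursive bs with an iterative left/right loop following the identical comparison path.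
import Mathlib
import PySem

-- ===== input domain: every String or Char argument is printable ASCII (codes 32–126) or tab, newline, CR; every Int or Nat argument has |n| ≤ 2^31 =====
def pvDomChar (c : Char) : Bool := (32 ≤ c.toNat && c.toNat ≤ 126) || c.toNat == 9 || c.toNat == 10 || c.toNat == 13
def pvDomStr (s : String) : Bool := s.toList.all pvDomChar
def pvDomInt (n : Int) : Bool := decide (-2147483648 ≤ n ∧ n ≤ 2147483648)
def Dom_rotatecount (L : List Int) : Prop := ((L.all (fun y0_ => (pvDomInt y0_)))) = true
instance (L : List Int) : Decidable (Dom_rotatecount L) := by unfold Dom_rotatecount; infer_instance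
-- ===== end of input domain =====

-- B removes A's repeated L.index scans via a first-occurrence dict built in one pass, and makes
-- bs an iterative left/right loop following the identical comparison path; same return value.

-- ===== PORT A =====
-- bs is only ever called (from rotatecount) with left = 0, right = L.length, and the recursion
-- keeps 0 ≤ left < median < right ≤ L.length on each call it makes, so Nat indices with
-- List.getD are exact on every reachable call (no IndexError, no negative width is reached).
def bsA (L : List Int) (item : Int) (left right : Nat) : Bool :=
  if right - left = 0 then false
  else if right - left = 1 then decide (L.getD left 0 = item)
  else
    let median := (right + left) / 2
    if L.getD median 0 = item then true
    else if item < L.getD median 0 then bsA L item left median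
    else bsA L item median right
termination_by right - left
decreasing_by all_goals omega

def rotatecount (L : List Int) : Int :=
  L.foldl (fun count i =>
    if ! bsA L i 0 L.length then
      match PySem.List.index? L i with
      | some idx => if idx = 0 then ((idx : Int) + 1) else (idx : Int)
      | none => count   -- unreachable: i ∈ L, so L.index(i) cannot raise
    else count) 0

-- ===== PORT B =====
-- same reachable-call invariant as bsA; Source B's while-loop is this tail recursion on (left, right)
def bsB (L : List Int) (item : Int) (left right : Nat) : Bool :=
  let width := right - left
  if width = 0 then false
  else if width = 1 then decide (L.getD left 0 = item)
  else
    let median := (right + left) / 2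
    if L.getD median 0 = item then true
    else if item < L.getD median 0 then bsB L item left median
    else bsB L item median right
termination_by right - left
decreasing_by all_goals omega

-- Source B's first-pass loop: 'for j, v in enumerate(L): if v not in first: first[v] = j'
def firstIdx (L : List Int) (s : Int) (d : PySem.Dict Int Int) : PySem.Dict Int Int :=
  (PySem.List.enumerate L s).foldl
    (fun d jv => if (PySem.Dict.get? d jv.2).isNone then PySem.Dict.insert d jv.2 jv.1 else d) d

def rotatecount_alt (L : List Int) : Int :=
  let first := firstIdx L 0 PySem.Dict.empty
  L.foldl (fun count v =>
    if ! bsB L v 0 L.length then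
      let fj := PySem.Dict.getD first v 0
      if fj = 0 then 1 else fj
    else count) 0

-- ===== PRECONDITION & SPEC =====
def Spec_rotatecount (L : List Int) (out : Int) : Prop := out = rotatecount_alt L
instance (L : List Int) (out : Int) : Decidable (Spec_rotatecount L out) := by unfold Spec_rotatecount; infer_instance

-- ===== CLAIM (what is proved, stated in full; the proofs are below) =====
def Claim_equal_rotatecount : Prop := ∀ (L : List Int), Dom_rotatecount L → Spec_rotatecount L (rotatecount L)

-- ===== LEMMAS AND PROOFS =====

-- the recursion and the loop follow the same comparison path
theorem bs_eq_aux (n : Nat) : ∀ (L : List Int) (item : Int) (l r : Nat), r - l ≤ n →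
    bsA L item l r = bsB L item l r := by
  induction n with
  | zero => intro L item l r h; rw [bsA, bsB]; simp [Nat.le_zero.mp h]
  | succ n ih =>
    intro L item l r h
    rw [bsA, bsB]
    by_cases h0 : r - l = 0
    · simp [h0]
    · by_cases h1 : r - l = 1
      · simp [h1]
      · simp only [h0, h1, if_false]
        rw [ih L item l ((r+l)/2) (by omega), ih L item ((r+l)/2) r (by omega)]

theorem bsA_eq_bsB (L : List Int) (item : Int) (left right : Nat) :
    bsA L item left right = bsB L item left right :=
  bs_eq_aux (right - left) L item left right (Nat.le_refl _)

-- the first-occurrence dict records s + (first index of v in L), unless v was already present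
theorem get?_firstIdx (L : List Int) (s : Int) (d : PySem.Dict Int Int) (v : Int) :
    PySem.Dict.get? (firstIdx L s d) v =
      match PySem.Dict.get? d v with
      | some j => some j
      | none => (PySem.List.index? L v).map (fun k => s + (k : Int)) := by
  induction L generalizing s d with
  | nil =>
    rw [firstIdx, PySem.List.enumerate_nil]
    cases h : PySem.Dict.get? d v <;> simp [h]
  | cons x t ih =>
    rw [firstIdx, PySem.List.enumerate_cons]
    simp only [List.foldl_cons]
    rw [show ∀ d', (PySem.List.enumerate t (s+1)).foldl
      (fun d jv => if (PySem.Dict.get? d jv.2).isNone then PySem.Dict.insert d jv.2 jv.1 else d) d'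
      = firstIdx t (s+1) d' from fun _ => rfl]
    rw [ih]
    by_cases hx : x = v
    · subst hx
      rw [PySem.List.index?_cons_self]
      cases hdx : PySem.Dict.get? d x with
      | some j => simp [hdx]
      | none =>
        simp only [Option.isNone_none, if_true]
        rw [PySem.Dict.get?_insert_self]
        simp
    · rw [PySem.List.index?_cons_of_ne t hx]
      have hins : (PySem.Dict.insert d x s).get? v = d.get? v :=
        PySem.Dict.get?_insert_of_ne d s (fun h => hx h.symm)
      cases hdi : (PySem.Dict.get? d x).isNone
      · simp only [Bool.false_eq_true, if_false]
        cases PySem.Dict.get? d v <;> cases PySem.List.index? t v <;> simp <;> omega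
      · simp only [if_true]
        rw [hins]
        cases PySem.Dict.get? d v <;> cases PySem.List.index? t v <;> simp <;> omega

theorem getD_firstIdx_of_index? (L : List Int) (v : Int) (k : Nat)
    (hk : PySem.List.index? L v = some k) :
    PySem.Dict.getD (firstIdx L 0 PySem.Dict.empty) v 0 = (k : Int) := by
  rw [PySem.Dict.getD_eq_get?_getD, get?_firstIdx, PySem.Dict.get?_empty, hk]
  simp

-- ===== VERDICT (by name: the statement is the Claim_ definition above) =====
theorem rotatecount_spec : Claim_equal_rotatecount := by
  intro L _
  show rotatecount L = rotatecount_alt L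
  unfold rotatecount rotatecount_alt
  apply PySem.List.foldl_congr_mem
  intro count v hv
  rw [bsA_eq_bsB]
  cases h : bsB L v 0 L.length with
  | true => simp
  | false =>
    simp only [Bool.not_false, if_true]
    cases hk : PySem.List.index? L v with
    | none => exact absurd ((PySem.List.index?_eq_none_iff L v).mp hk) (by simp [hv])
    | some k =>
      rw [getD_firstIdx_of_index? L v k hk]
      by_cases h0 : k = 0 <;> simp [h0]
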